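-- pv_equiv track=rewrite | github.com/AkshayM21/srp2018 | correct_test.py | get_coordinate_tuple
-- ===== SOURCE A (Python) =====
-- def get_coordinate_tuple(blockinfo):
--     topleftx = blockinfo[0]
--     toplefty = blockinfo[1]
--     diameter = blockinfo[2]
--     coordinate_list = []
--     x = topleftx
--     y = toplefty
--     for _ in range(diameter**2):
--         coordinate_list.append((y, x))
--         if x==topleftx+diameter-1:
--             x = topleftx
--             y+=1
--             continue
--         x+=1
--     return  coordinate_list
-- ===== SOURCE B (Python) =====
-- def get_coordinate_tuple(blockinfo):
--     topleftx = blockinfo[0]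
--     toplefty = blockinfo[1]
--     diameter = blockinfo[2]
--     return [(y, x)
--             for y in range(toplefty, toplefty + diameter)
--             for x in range(topleftx, topleftx + diameter)]
-- ===== Notes on version B (the rewrite author's own statement) =====
-- stated objective: idiomatic
-- what changed: Replaces the single flat loop of diameter**2 steps with manual x-wrap state by a nested comprehension over the y- and x-ranges of the block.
-- intended difference: For negative diameter A returns diameter**2 spurious tuples produced by its leftover wrap state, while B returns the empty list, the intended result for a non-positive block size. — e.g. on get_coordinate_tuple(0, 0, -1): A returns [(0, 0)], B returns []
import Mathlib
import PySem

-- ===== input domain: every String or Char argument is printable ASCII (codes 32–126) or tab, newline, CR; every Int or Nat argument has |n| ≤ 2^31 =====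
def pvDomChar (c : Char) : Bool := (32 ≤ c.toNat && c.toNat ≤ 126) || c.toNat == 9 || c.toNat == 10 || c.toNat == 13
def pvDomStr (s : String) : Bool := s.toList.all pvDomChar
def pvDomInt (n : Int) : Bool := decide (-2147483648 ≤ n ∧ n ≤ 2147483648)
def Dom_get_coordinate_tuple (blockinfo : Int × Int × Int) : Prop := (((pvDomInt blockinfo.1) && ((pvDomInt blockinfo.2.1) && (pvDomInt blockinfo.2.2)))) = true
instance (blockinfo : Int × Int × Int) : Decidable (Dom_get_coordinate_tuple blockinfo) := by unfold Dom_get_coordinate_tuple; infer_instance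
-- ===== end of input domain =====

-- B replaces A's flat diameter**2-step loop with manual wrap state by a nested
-- comprehension over the y- and x-ranges of the block (idiomatic); for negative
-- diameter A returns spurious tuples while B returns [], stated as D_ below.


-- ===== PORT A =====
-- loop body of A: append (y, x), then wrap x (and bump y) at the right edge
def gctStep (topleftx diameter : Int)
    (s : List (Int × Int) × Int × Int) (_ : Int) : List (Int × Int) × Int × Int :=
  let acc := s.1 ++ [(s.2.2, s.2.1)]
  if s.2.1 = topleftx + diameter - 1 then (acc, topleftx, s.2.2 + 1)
  else (acc, s.2.1 + 1, s.2.2)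

def get_coordinate_tuple (blockinfo : Int × Int × Int) : List (Int × Int) :=
  let topleftx := blockinfo.1
  let toplefty := blockinfo.2.1
  let diameter := blockinfo.2.2
  ((PySem.List.pyRange 0 (diameter ^ 2) 1).foldl (gctStep topleftx diameter)
    ([], topleftx, toplefty)).1

-- ===== PORT B =====
def get_coordinate_tuple_alt (blockinfo : Int × Int × Int) : List (Int × Int) :=
  let topleftx := blockinfo.1
  let toplefty := blockinfo.2.1
  let diameter := blockinfo.2.2
  (PySem.List.pyRange toplefty (toplefty + diameter) 1).flatMap (fun y =>
    (PySem.List.pyRange topleftx (topleftx + diameter) 1).map (fun x => (y, x)))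

-- ===== PRECONDITION & SPEC =====
-- For negative diameter A returns diameter**2 spurious tuples produced by its leftover
-- wrap state, while B returns the empty list, the intended result for a non-positive block size.
def D_get_coordinate_tuple (blockinfo : Int × Int × Int) : Prop := blockinfo.2.2 < 0
instance (blockinfo : Int × Int × Int) : Decidable (D_get_coordinate_tuple blockinfo) := by
  unfold D_get_coordinate_tuple; infer_instance

def Spec_get_coordinate_tuple (blockinfo : Int × Int × Int) (out : List (Int × Int)) : Prop :=
  ¬ D_get_coordinate_tuple blockinfo → out = get_coordinate_tuple_alt blockinfo
instance (blockinfo : Int × Int × Int) (out : List (Int × Int)) :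
    Decidable (Spec_get_coordinate_tuple blockinfo out) := by
  unfold Spec_get_coordinate_tuple; infer_instance

def pvDiffWitness_get_coordinate_tuple : (Int × Int × Int) := (0, 0, -1)
def pvDiffWitnessOut_get_coordinate_tuple : (List (Int × Int)) × (List (Int × Int)) :=
  ([(0, 0)], [])

-- ===== CLAIM =====
def Claim_unchanged_get_coordinate_tuple : Prop := ∀ (blockinfo : Int × Int × Int), Dom_get_coordinate_tuple blockinfo → Spec_get_coordinate_tuple blockinfo (get_coordinate_tuple blockinfo)
def Claim_changed_get_coordinate_tuple : Prop := Dom_get_coordinate_tuple (pvDiffWitness_get_coordinate_tuple) ∧ D_get_coordinate_tuple (pvDiffWitness_get_coordinate_tuple) ∧ get_coordinate_tuple (pvDiffWitness_get_coordinate_tuple) = pvDiffWitnessOut_get_coordinate_tuple.1 ∧ get_coordinate_tuple_alt (pvDiffWitness_get_coordinate_tuple) = pvDiffWitnessOut_get_coordinate_tuple.2 ∧ pvDiffWitnessOut_get_coordinate_tuple.1 ≠ pvDiffWitnessOut_get_coordinate_tuple.2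
def Claim_exact_get_coordinate_tuple : Prop := ∀ (blockinfo : Int × Int × Int), Dom_get_coordinate_tuple blockinfo → D_get_coordinate_tuple blockinfo → get_coordinate_tuple blockinfo ≠ get_coordinate_tuple_alt blockinfo

-- ===== LEMMAS AND PROOFS =====

-- A's loop body ignores the range element, so the foldl is a pure iteration.
def gctIter (topleftx diameter : Int) (s : List (Int × Int) × Int × Int) :
    Nat → List (Int × Int) × Int × Int
  | 0 => s
  | n + 1 => gctIter topleftx diameter (gctStep topleftx diameter s 0) n

theorem gct_foldl_eq_iter (tlx d : Int) (l : List Int) :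
    ∀ s, l.foldl (gctStep tlx d) s = gctIter tlx d s l.length := by
  induction l with
  | nil => intro s; rfl
  | cons a l ih =>
      intro s
      simp only [List.foldl_cons, List.length_cons, gctIter, ih]
      rfl

theorem gctIter_add (tlx d : Int) (s : List (Int × Int) × Int × Int) (m k : Nat) :
    gctIter tlx d s (m + k) = gctIter tlx d (gctIter tlx d s m) k := by
  induction m generalizing s with
  | zero => simp [gctIter]
  | succ m ih =>
      have : m + 1 + k = (m + k) + 1 := by omega
      rw [this]
      show gctIter tlx d (gctStep tlx d s 0) (m + k) = _
      rw [ih]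
      rfl

-- one row of A's loop: k remaining steps, cursor at x with x + k = tlx + d
theorem gct_row_aux (tlx d y : Int) :
    ∀ (k : Nat) (acc : List (Int × Int)) (x : Int),
      x + k = tlx + d → 1 ≤ k →
      gctIter tlx d (acc, x, y) k =
        (acc ++ (PySem.List.pyRange x (tlx + d) 1).map (fun t => (y, t)), tlx, y + 1) := by
  intro k
  induction k with
  | zero => intro acc x _ h; omega
  | succ k ih =>
      intro acc x hx _
      by_cases hk : k = 0
      · subst hk
        have hxe : x = tlx + d - 1 := by push_cast at hx; omega
        show gctIter tlx d (gctStep tlx d (acc, x, y) 0) 0 = _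
        simp only [gctStep, gctIter, if_pos hxe]
        rw [show tlx + d = x + 1 by omega, PySem.List.pyRange_one_singleton]
        simp
      · have hxne : x ≠ tlx + d - 1 := by push_cast at hx; omega
        show gctIter tlx d (gctStep tlx d (acc, x, y) 0) k = _
        simp only [gctStep, if_neg hxne]
        rw [ih (acc ++ [(y, x)]) (x + 1) (by push_cast at hx ⊢; omega) (by omega)]
        rw [PySem.List.pyRange_one_cons (by push_cast at hx; omega : x < tlx + d)]
        simp

-- r full rows of A's loop
theorem gct_rows (tlx d : Int) (hd : 0 < d) :
    ∀ (r : Nat) (acc : List (Int × Int)) (y : Int),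
      gctIter tlx d (acc, tlx, y) (r * d.toNat) =
        (acc ++ (PySem.List.pyRange y (y + r) 1).flatMap (fun yy =>
          (PySem.List.pyRange tlx (tlx + d) 1).map (fun x => (yy, x))), tlx, y + r) := by
  intro r
  induction r with
  | zero =>
      intro acc y
      simp [gctIter, PySem.List.pyRange_one_eq_nil (le_refl y)]
  | succ r ih =>
      intro acc y
      have hsplit : (r + 1) * d.toNat = d.toNat + r * d.toNat := by ring
      rw [hsplit, gctIter_add]
      rw [gct_row_aux tlx d y d.toNat acc tlx
            (by rw [Int.toNat_of_nonneg (le_of_lt hd)]) (by omega)]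
      rw [ih]
      push_cast
      have h1 : y + ((r : Int) + 1) = y + 1 + r := by ring
      rw [h1, PySem.List.pyRange_one_cons (by omega : y < y + 1 + r)]
      simp [List.flatMap_cons, List.append_assoc]

-- each iteration appends exactly one tuple
theorem gctIter_length (tlx d : Int) :
    ∀ (n : Nat) (s : List (Int × Int) × Int × Int),
      (gctIter tlx d s n).1.length = s.1.length + n := by
  intro n
  induction n with
  | zero => intro s; rfl
  | succ n ih =>
      intro s
      show (gctIter tlx d (gctStep tlx d s 0) n).1.length = _
      rw [ih]
      unfold gctStep
      split_ifs <;> simp <;> omega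

theorem alt_empty_of_neg (tlx tly d : Int) (h : d < 0) :
    get_coordinate_tuple_alt (tlx, tly, d) = [] := by
  show (PySem.List.pyRange tly (tly + d) 1).flatMap
      (fun y => (PySem.List.pyRange tlx (tlx + d) 1).map (fun x => (y, x))) = []
  rw [PySem.List.pyRange_one_eq_nil (by omega : tly + d ≤ tly)]
  rfl

-- ===== VERDICT =====
theorem get_coordinate_tuple_spec : Claim_unchanged_get_coordinate_tuple := by
  intro ⟨tlx, tly, d⟩ _ hnd
  have hd : 0 ≤ d := by
    unfold D_get_coordinate_tuple at hnd; simp at hnd; omega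
  unfold get_coordinate_tuple get_coordinate_tuple_alt
  simp only
  rw [gct_foldl_eq_iter, PySem.List.length_pyRange_one]
  rcases lt_or_eq_of_le hd with hd | hd
  · have hsq : (d ^ 2 - 0).toNat = d.toNat * d.toNat := by
      have h1 : d ^ 2 - 0 = d * d := by ring
      rcases Int.eq_ofNat_of_zero_le (le_of_lt hd) with ⟨n, hn⟩
      subst hn
      rw [h1, ← Int.natCast_mul, Int.toNat_natCast, Int.toNat_natCast]
    rw [hsq, gct_rows tlx d hd d.toNat [] tly]
    rw [Int.toNat_of_nonneg (le_of_lt hd)]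
    simp
  · subst hd
    simp [gctIter, PySem.List.pyRange_one_eq_nil (le_refl tly)]

theorem get_coordinate_tuple_changed : Claim_changed_get_coordinate_tuple := by
  unfold Claim_changed_get_coordinate_tuple; decide

theorem get_coordinate_tuple_tight : Claim_exact_get_coordinate_tuple := by
  intro ⟨tlx, tly, d⟩ _ hD
  unfold D_get_coordinate_tuple at hD
  simp only at hD
  rw [alt_empty_of_neg tlx tly d hD]
  intro hcontra
  have hlen := gctIter_length tlx d (PySem.List.pyRange 0 (d ^ 2) 1).length ([], tlx, tly)
  unfold get_coordinate_tuple at hcontra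
  simp only at hcontra
  rw [gct_foldl_eq_iter] at hcontra
  rw [hcontra] at hlen
  rw [PySem.List.length_pyRange_one] at hlen
  have hpos : 0 < (d ^ 2 - 0).toNat := by
    have : 1 ≤ d ^ 2 := by nlinarith
    omega
  simp only [List.length_nil] at hlen
  omega
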